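-- pv_equiv track=rewrite | github.com/gauravpurohit1981/chatbot | chat_engine.py | extract_relevant_sentences
-- ===== SOURCE A (Python) =====
-- def extract_relevant_sentences(query: str, context: str) -> str:
--     """Extract the most relevant sentences from the context based on keyword matching."""
--     # Simplify the query and context for better matching
--     query_words = set(query.lower().split())
--     sentences = context.split('.')
--
--     # Find sentences with the most query words
--     relevant_sentences = []
--     for sentence in sentences:
--         sentence = sentence.strip()
--         if not sentence:
--             continue
--
--         # Count keyword matches
--         sentence_words = set(sentence.lower().split())
--         matching_words = query_words.intersection(sentence_words)
--
--         if len(matching_words) > 0: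
--             relevant_sentences.append((sentence, len(matching_words)))
--
--     # Sort by relevance (number of matching keywords)
--     relevant_sentences.sort(key=lambda x: x[1], reverse=True)
--
--     # Return the most relevant sentences
--     result = '. '.join([s[0] for s in relevant_sentences[:3]])
--     return result if result else context.split('.')[0]
-- ===== SOURCE B (Python) =====
-- def extract_relevant_sentences(query: str, context: str) -> str:
--     """Extract the most relevant sentences from the context based on keyword matching.
--
--     Bucket-selection variant: instead of sorting the (sentence, count) list,
--     track the maximum match count and sweep the counts downward, collecting
--     each count's sentences in original order until three are gathered.
--     """
--     query_words = set(query.lower().split())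
--     pairs = []
--     mx = 0
--     for sentence in context.split('.'):
--         s = sentence.strip()
--         if s:
--             c = len(query_words & set(s.lower().split()))
--             if c > 0:
--                 pairs.append((s, c))
--                 if mx < c:
--                     mx = c
--     picked = []
--     for c in range(mx, 0, -1):
--         if len(picked) >= 3:
--             break
--         picked.extend(s for (s, k) in pairs if k == c)
--     result = '. '.join(picked[:3])
--     return result if result else context.split('.')[0]
-- ===== Notes on version B (the rewrite author's own statement) =====
-- stated objective: alternative
-- what changed: Replaces the stable reverse sort of the (sentence, count) list by a max-count tracker plus a downward bucket sweep over match counts that collects sentences in original order and stops once three are gathered.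
import Mathlib
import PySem

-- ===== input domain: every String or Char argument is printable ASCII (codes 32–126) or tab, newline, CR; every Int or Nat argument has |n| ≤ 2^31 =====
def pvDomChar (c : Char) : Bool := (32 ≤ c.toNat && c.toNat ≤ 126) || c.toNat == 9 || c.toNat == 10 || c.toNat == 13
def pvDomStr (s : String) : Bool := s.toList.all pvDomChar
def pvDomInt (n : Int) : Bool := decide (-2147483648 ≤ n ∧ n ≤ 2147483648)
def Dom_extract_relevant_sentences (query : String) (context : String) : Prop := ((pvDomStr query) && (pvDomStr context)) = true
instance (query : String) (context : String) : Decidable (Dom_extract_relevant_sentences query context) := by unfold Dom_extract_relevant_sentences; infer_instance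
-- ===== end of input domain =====

-- B replaces A's stable reverse sort of (sentence, count) pairs by a max-count tracker and a
-- downward bucket sweep over match counts (objective: alternative algorithm, same results).

-- ===== PORT A =====
-- loop body of A's 'for sentence in sentences' (kept as a named helper)
def pvStepA (query_words : PySem.Set String) (acc : List (String × Int)) (sentence : String) :
    List (String × Int) :=
  let s := PySem.Str.strip sentence
  if s = "" then acc
  else
    let sentence_words := PySem.Set.ofList (PySem.Str.split₀ (PySem.Str.lower s))
    let m := PySem.Set.len (PySem.Set.inter query_words sentence_words)
    if 0 < m then acc ++ [(s, m)] else acc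

def extract_relevant_sentences (query : String) (context : String) : String :=
  let query_words := PySem.Set.ofList (PySem.Str.split₀ (PySem.Str.lower query))
  -- context.split('.') : separator is non-empty, so split? is always 'some'
  let sentences := (PySem.Str.split? context ".").getD []
  let relevant_sentences := sentences.foldl (pvStepA query_words) []
  let sortedRel := PySem.List.sorted relevant_sentences (fun x => x.2) true
  let result := PySem.Str.join ". " ((sortedRel.take 3).map (fun s => s.1))
  -- context.split('.')[0] : split? of a non-empty separator never returns an empty list
  if result ≠ "" then result else ((PySem.Str.split? context ".").getD []).headD ""

-- ===== PORT B =====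
-- loop body of B's building loop: state is (pairs, mx)
def pvStepB (query_words : PySem.Set String) (st : List (String × Int) × Int) (sentence : String) :
    List (String × Int) × Int :=
  let s := PySem.Str.strip sentence
  if s ≠ "" then
    let c := PySem.Set.len (PySem.Set.inter query_words (PySem.Set.ofList (PySem.Str.split₀ (PySem.Str.lower s))))
    if 0 < c then (st.1 ++ [(s, c)], if st.2 < c then c else st.2) else st
  else st

-- B's 'for c in range(mx, 0, -1): if len(picked) >= 3: break; picked.extend(...)'
def pvPickLoop (pairs : List (String × Int)) : List Int → List String → List String
  | [], picked => picked
  | c :: rest, picked =>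
    if 3 ≤ picked.length then picked
    else pvPickLoop pairs rest (picked ++ (pairs.filter (fun p => decide (p.2 = c))).map (fun p => p.1))

def extract_relevant_sentences_alt (query : String) (context : String) : String :=
  let query_words := PySem.Set.ofList (PySem.Str.split₀ (PySem.Str.lower query))
  let st := ((PySem.Str.split? context ".").getD []).foldl (pvStepB query_words) ([], 0)
  let picked := pvPickLoop st.1 (PySem.List.pyRange st.2 0 (-1)) []
  let result := PySem.Str.join ". " (picked.take 3)
  if result ≠ "" then result else ((PySem.Str.split? context ".").getD []).headD ""

-- ===== PRECONDITION & SPEC =====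
def Spec_extract_relevant_sentences (query : String) (context : String) (out : String) : Prop := out = extract_relevant_sentences_alt query context
instance (query : String) (context : String) (out : String) : Decidable (Spec_extract_relevant_sentences query context out) := by unfold Spec_extract_relevant_sentences; infer_instance

-- ===== CLAIM (what is proved, stated in full; the proofs are below) =====
def Claim_equal_extract_relevant_sentences : Prop := ∀ (query : String) (context : String), Dom_extract_relevant_sentences query context → Spec_extract_relevant_sentences query context (extract_relevant_sentences query context)

-- ===== LEMMAS AND PROOFS =====

-- [n, n-1, ..., 1] as integers
def pvDesc : Nat → List Int
  | 0 => []
  | n + 1 => ((n : Int) + 1) :: pvDesc n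

lemma pvDesc_mem {n : Nat} {c : Int} : c ∈ pvDesc n ↔ 1 ≤ c ∧ c ≤ (n : Int) := by
  induction n with
  | zero => simp [pvDesc]; omega
  | succ n ih => simp [pvDesc, ih]; omega

lemma pvDesc_eq_range (n : Nat) : pvDesc n = (List.range n).map (fun (k : Nat) => (n : Int) - (k : Int)) := by
  induction n with
  | zero => simp [pvDesc]
  | succ n ih =>
    rw [pvDesc, List.range_succ_eq_map, List.map_cons, List.map_map, ih]
    refine List.cons_eq_cons.mpr ⟨by push_cast; ring, ?_⟩
    apply List.map_congr_left
    intro k _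
    simp only [Function.comp_apply, Nat.succ_eq_add_one]
    push_cast
    ring

lemma pyRange_desc (n : Nat) : PySem.List.pyRange (n : Int) 0 (-1) = pvDesc n := by
  rw [pvDesc_eq_range]
  rcases Nat.eq_zero_or_pos n with h | h
  · subst h; simp [PySem.List.pyRange]
  · simp only [PySem.List.pyRange]
    rw [if_neg (by norm_num)]
    have h1 : ¬ ((0:Int) < -1) := by norm_num
    have h2 : (0:Int) < (n:Int) := by exact_mod_cast h
    simp only [h1, if_false, h2, if_true]
    have h3 : (((n:Int) - 0 + -(-1) - 1) / -(-1)).toNat = n := by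
      norm_num
    rw [h3]
    apply List.map_congr_left
    intro k _
    ring

lemma flatMap_congr {α β : Type} {l : List α} {f g : α → List β}
    (h : ∀ c ∈ l, f c = g c) : l.flatMap f = l.flatMap g := by
  induction l with
  | nil => rfl
  | cons a t ih => simp [List.flatMap_cons, h a (by simp), ih (fun c hc => h c (by simp [hc]))]

lemma insertBy_append_left {α : Type} (before : α → α → Bool) (x : α) (l1 l2 : List α)
    (h : ∀ y ∈ l1, before x y = false) :
    PySem.List.insertBy before x (l1 ++ l2) = l1 ++ PySem.List.insertBy before x l2 := by
  induction l1 with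
  | nil => simp
  | cons a t ih =>
    simp only [List.cons_append, PySem.List.insertBy]
    rw [h a (by simp)]
    simp [ih (fun y hy => h y (by simp [hy]))]

lemma insertBy_eq_cons {α : Type} (before : α → α → Bool) (x : α) (l : List α)
    (h : ∀ y ∈ l, before x y = true) :
    PySem.List.insertBy before x l = x :: l := by
  cases l with
  | nil => rfl
  | cons a t => simp [PySem.List.insertBy, h a (by simp)]

lemma mem_flatMap_bucket {ps : List (String × Int)} {n : Nat} {y : String × Int}
    (hy : y ∈ (pvDesc n).flatMap (fun c => ps.filter (fun p => decide (p.2 = c)))) :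
    1 ≤ y.2 ∧ y.2 ≤ (n : Int) := by
  simp only [List.mem_flatMap, List.mem_filter, decide_eq_true_eq] at hy
  obtain ⟨c, hc, _, rfl⟩ := hy
  exact pvDesc_mem.mp hc

lemma ins_flat (n : Nat) (ps : List (String × Int)) (x : String × Int)
    (h1 : 1 ≤ x.2) (h2 : x.2 ≤ (n : Int)) :
    PySem.List.insertBy (fun a b => decide (b.2 < a.2)) x
      ((pvDesc n).flatMap (fun c => ps.filter (fun p => decide (p.2 = c)))) =
    (pvDesc n).flatMap (fun c => (ps ++ [x]).filter (fun p => decide (p.2 = c))) := by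
  induction n with
  | zero => exact absurd (le_trans h1 h2) (by norm_num)
  | succ n ih =>
    rw [pvDesc, List.flatMap_cons, List.flatMap_cons]
    by_cases hx : x.2 = (n : Int) + 1
    · -- x belongs to the top bucket
      rw [insertBy_append_left _ _ _ _ (by
        intro y hy
        simp only [List.mem_filter, decide_eq_true_eq] at hy
        simp [hy.2, hx])]
      rw [insertBy_eq_cons _ _ _ (by
        intro y hy
        have := mem_flatMap_bucket hy
        simp only [decide_eq_true_eq]
        omega)]
      have hbucket : (ps ++ [x]).filter (fun p => decide (p.2 = (n : Int) + 1)) =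
          ps.filter (fun p => decide (p.2 = (n : Int) + 1)) ++ [x] := by
        rw [List.filter_append]
        simp [hx]
      rw [hbucket, List.append_assoc, List.singleton_append]
      congr 1
      congr 1
      apply flatMap_congr
      intro c hc
      have hcn := pvDesc_mem.mp hc
      rw [List.filter_append]
      simp only [List.filter_cons, List.filter_nil]
      rw [if_neg (by simp; omega)]
      simp
    · -- x goes below the top bucket
      have hxn : x.2 ≤ (n : Int) := by push_cast at h2; omega
      rw [insertBy_append_left _ _ _ _ (by
        intro y hy
        simp only [List.mem_filter, decide_eq_true_eq] at hy
        simp only [decide_eq_false_iff_not, not_lt]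
        omega)]
      rw [ih hxn]
      congr 1
      rw [List.filter_append]
      simp only [List.filter_cons, List.filter_nil]
      rw [if_neg (by simpa using hx)]
      simp

lemma sorted_eq_buckets (ps : List (String × Int)) (n : Nat)
    (h : ∀ p ∈ ps, 1 ≤ p.2 ∧ p.2 ≤ (n : Int)) :
    PySem.List.sorted ps (fun x => x.2) true =
      (pvDesc n).flatMap (fun c => ps.filter (fun p => decide (p.2 = c))) := by
  rw [PySem.List.sorted_rev_eq_foldl_insertBy]
  induction ps using List.reverseRecOn with
  | nil =>
    induction n with
    | zero => rfl
    | succ n ih => simp only [pvDesc, List.flatMap_cons, List.filter_nil, List.nil_append]; exact ih (by simp)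
  | append_singleton ps x ih =>
    rw [List.foldl_append, List.foldl_cons, List.foldl_nil]
    rw [ih (fun p hp => h p (by simp [hp]))]
    exact ins_flat n ps x (h x (by simp)).1 (h x (by simp)).2

lemma pick_take (pairs : List (String × Int)) (cs : List Int) (acc : List String) :
    (pvPickLoop pairs cs acc).take 3 =
      (acc ++ cs.flatMap (fun c => (pairs.filter (fun p => decide (p.2 = c))).map (fun p => p.1))).take 3 := by
  induction cs generalizing acc with
  | nil => simp [pvPickLoop]
  | cons c rest ih =>
    rw [pvPickLoop]
    split_ifs with hlen
    · rw [List.flatMap_cons, ← List.append_assoc]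
      rw [List.take_append_of_le_length (by simp only [List.length_append]; omega),
        List.take_append_of_le_length (by omega)]
    · rw [ih, List.flatMap_cons, List.append_assoc]

lemma build_eq (qw : PySem.Set String) (sentences : List String)
    (ps0 : List (String × Int)) (m0 : Int) (hm0 : 0 ≤ m0)
    (hinv : ∀ p ∈ ps0, 1 ≤ p.2 ∧ p.2 ≤ m0) :
    (sentences.foldl (pvStepB qw) (ps0, m0)).1 = sentences.foldl (pvStepA qw) ps0 ∧
      0 ≤ (sentences.foldl (pvStepB qw) (ps0, m0)).2 ∧
      ∀ p ∈ (sentences.foldl (pvStepB qw) (ps0, m0)).1,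
        1 ≤ p.2 ∧ p.2 ≤ (sentences.foldl (pvStepB qw) (ps0, m0)).2 := by
  induction sentences generalizing ps0 m0 with
  | nil => exact ⟨rfl, hm0, hinv⟩
  | cons sentence rest ih =>
    simp only [List.foldl_cons]
    by_cases hs : PySem.Str.strip sentence = ""
    · rw [show pvStepB qw (ps0, m0) sentence = (ps0, m0) by simp [pvStepB, hs],
        show pvStepA qw ps0 sentence = ps0 by simp [pvStepA, hs]]
      exact ih ps0 m0 hm0 hinv
    · by_cases hc : 0 < PySem.Set.len (PySem.Set.inter qw
        (PySem.Set.ofList (PySem.Str.split₀ (PySem.Str.lower (PySem.Str.strip sentence)))))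
      · set c := PySem.Set.len (PySem.Set.inter qw
          (PySem.Set.ofList (PySem.Str.split₀ (PySem.Str.lower (PySem.Str.strip sentence))))) with hcdef
        have hcN : 0 < List.length (PySem.Set.inter qw
            (PySem.Set.ofList (PySem.Str.split₀ (PySem.Str.lower (PySem.Str.strip sentence))))) := by
          rw [hcdef] at hc
          simp only [PySem.Set.len] at hc
          exact_mod_cast hc
        rw [show pvStepB qw (ps0, m0) sentence =
            (ps0 ++ [(PySem.Str.strip sentence, c)], if m0 < c then c else m0) by
              simp [pvStepB, hs, hcN, hcdef, PySem.Set.len],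
          show pvStepA qw ps0 sentence = ps0 ++ [(PySem.Str.strip sentence, c)] by
              simp [pvStepA, hs, hcN, hcdef, PySem.Set.len]]
        apply ih
        · split_ifs with h <;> omega
        · intro p hp
          rcases List.mem_append.mp hp with hp | hp
          · have := hinv p hp
            split_ifs with h <;> constructor <;> omega
          · simp only [List.mem_singleton] at hp
            subst hp
            simp only
            split_ifs with h <;> omega
      · have hcN : ¬ 0 < List.length (PySem.Set.inter qw
            (PySem.Set.ofList (PySem.Str.split₀ (PySem.Str.lower (PySem.Str.strip sentence))))) := by
          simp only [PySem.Set.len] at hc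
          intro h
          exact hc (by exact_mod_cast h)
        rw [show pvStepB qw (ps0, m0) sentence = (ps0, m0) by simp [pvStepB, hs, hcN],
          show pvStepA qw ps0 sentence = ps0 by simp [pvStepA, hs, hcN]]
        exact ih ps0 m0 hm0 hinv

-- ===== VERDICT (by name: the statement is the Claim_ definition above) =====
theorem extract_relevant_sentences_spec : Claim_equal_extract_relevant_sentences := by
  intro query context _
  show extract_relevant_sentences query context = extract_relevant_sentences_alt query context
  simp only [extract_relevant_sentences, extract_relevant_sentences_alt]
  set qw := PySem.Set.ofList (PySem.Str.split₀ (PySem.Str.lower query)) with hqw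
  set sentences := (PySem.Str.split? context ".").getD [] with hsen
  obtain ⟨hfst, hm, hinv⟩ := build_eq qw sentences [] 0 le_rfl (by simp)
  set st := sentences.foldl (pvStepB qw) ([], 0) with hst
  have hcast : ((st.2.toNat : Nat) : Int) = st.2 := Int.toNat_of_nonneg hm
  have hsorted := sorted_eq_buckets st.1 st.2.toNat (by
    intro p hp
    have := hinv p hp
    rw [hcast]
    exact this)
  have hlist : ((PySem.List.sorted (sentences.foldl (pvStepA qw) []) (fun x => x.2) true).take 3).map
        (fun s => s.1) = (pvPickLoop st.1 (PySem.List.pyRange st.2 0 (-1)) []).take 3 := by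
    rw [← hfst, hsorted, ← hcast, pyRange_desc, pick_take, List.nil_append, List.map_take,
      List.map_flatMap]
    simp only [Int.toNat_natCast]
  rw [hlist]
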